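-- pv_equiv track=rewrite | github.com/edermotasantos/restaurant-orders | src/track_orders.py | busiest_day
-- ===== SOURCE A (Python) =====
-- def busiest_day(order_list):
--     count = {}
--     most_busy = order_list[0][2]
--     for order in order_list:
--         if order[2] not in count:
--             count[order[2]] = 1
--         else:
--             count[order[2]] += 1
--         if count[order[2]] > count[most_busy]:
--             most_busy = order[2]
--     return most_busy
-- ===== SOURCE B (Python) =====
-- def busiest_day(order_list):
--     counts = {}
--     for order in order_list:
--         counts[order[2]] = counts.get(order[2], 0) + 1
--     peak = max(counts.values())
--     running = {}
--     for order in order_list: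
--         day = order[2]
--         running[day] = running.get(day, 0) + 1
--         if running[day] == peak:
--             return day
-- ===== Notes on version B (the rewrite author's own statement) =====
-- stated objective: alternative
-- what changed: A interleaves counting with max-tracking in one pass over a single dict; B first builds the complete per-day count table and takes its maximum M, then a second fresh-count scan returns the first day whose running count reaches M (same first-to-reach-peak tie rule). Pre_ excludes only the empty list, on which both A (IndexError) and B (ValueError) raise.
import Mathlib
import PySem

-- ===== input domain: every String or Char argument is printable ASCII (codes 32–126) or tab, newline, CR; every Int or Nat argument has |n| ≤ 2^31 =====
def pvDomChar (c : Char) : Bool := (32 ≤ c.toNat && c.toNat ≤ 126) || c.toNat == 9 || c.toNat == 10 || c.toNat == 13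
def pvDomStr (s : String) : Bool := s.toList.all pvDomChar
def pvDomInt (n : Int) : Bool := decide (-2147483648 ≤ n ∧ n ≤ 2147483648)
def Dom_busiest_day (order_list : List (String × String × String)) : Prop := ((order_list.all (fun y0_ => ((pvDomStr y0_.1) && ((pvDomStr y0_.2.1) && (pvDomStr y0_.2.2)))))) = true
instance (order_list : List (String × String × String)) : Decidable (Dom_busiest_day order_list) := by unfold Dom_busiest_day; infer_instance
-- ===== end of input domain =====

-- B replaces A's single interleaved count-and-track-max pass by two passes: build the full
-- count table and its maximum M, then return the first day whose running count reaches M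
-- (objective: alternative decomposition, same O(n) cost).

-- ===== PORT A =====
def busiest_day (order_list : List (String × String × String)) : String :=
  match order_list with
  | [] => ""   -- Python raises IndexError on order_list[0]; excluded by Pre_
  | o0 :: _ =>
    (order_list.foldl (fun st o =>
        let count :=
          if st.1.contains o.2.2 = false then st.1.insert o.2.2 (1 : Int)
          else st.1.modify o.2.2 0 (· + 1)
        -- count[most_busy]: the key is always present here (most_busy is inserted on the
        -- first iteration), so getD is exact where Python returns
        let mb := if count.getD o.2.2 0 > count.getD st.2 0 then o.2.2 else st.2
        (count, mb))
      ((PySem.Dict.empty : PySem.Dict String Int), o0.2.2)).2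

-- ===== PORT B =====
-- second pass of Source B: running count, return at the first day reaching peak
def busiestAltScan (peak : Int) : List (String × String × String) → PySem.Dict String Int → String
  | [], _ => ""   -- Python's loop falls through only when peak is never reached; unreachable inside Pre_
  | o :: rest, running =>
    let running' := running.insert o.2.2 (running.getD o.2.2 0 + 1)
    if running'.getD o.2.2 0 = peak then o.2.2 else busiestAltScan peak rest running'

def busiest_day_alt (order_list : List (String × String × String)) : String :=
  let counts := order_list.foldl (fun d o => d.insert o.2.2 (d.getD o.2.2 0 + 1))
                  (PySem.Dict.empty : PySem.Dict String Int)
  -- max(counts.values()): raises ValueError on the empty list; excluded by Pre_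
  let peak := (PySem.List.max? counts.values (fun x => x)).getD 0
  busiestAltScan peak order_list PySem.Dict.empty

-- ===== PRECONDITION & SPEC =====
-- Pre_ excludes exactly the empty list, on which Python A raises IndexError (and B ValueError).
def Pre_busiest_day (order_list : List (String × String × String)) : Prop := order_list ≠ []
instance (order_list : List (String × String × String)) : Decidable (Pre_busiest_day order_list) := by unfold Pre_busiest_day; infer_instance
def pvWitness_busiest_day : (List (String × String × String)) := [("1", "a", "mon"), ("2", "b", "tue"), ("3", "c", "tue")]

def Spec_busiest_day (order_list : List (String × String × String)) (out : String) : Prop := out = busiest_day_alt order_list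
instance (order_list : List (String × String × String)) (out : String) : Decidable (Spec_busiest_day order_list out) := by unfold Spec_busiest_day; infer_instance

-- ===== CLAIM (what is proved, stated in full; the proofs are below) =====
def Claim_equal_busiest_day : Prop := ∀ (order_list : List (String × String × String)), Dom_busiest_day order_list → Pre_busiest_day order_list → Spec_busiest_day order_list (busiest_day order_list)

-- ===== LEMMAS AND PROOFS =====

-- day-count of d in a list of day strings, as an Int
def cntS (xs : List String) (d : String) : Int := (xs.count d : Int)

-- running maximum of the per-day counts over all positions (0 for the empty list)
def maxcS (xs : List String) : Int := xs.foldl (fun m d => max m (cntS xs d)) 0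

-- first day whose running count (relative to accumulated prefix p) reaches M
def frS (M : Int) : List String → List String → Option String
  | _, [] => none
  | p, d :: r => if cntS (p ++ [d]) d = M then some d else frS M (p ++ [d]) r

theorem cntS_nonneg (xs d) : 0 ≤ cntS xs d := by simp [cntS]

theorem cntS_append (p q d) : cntS (p ++ q) d = cntS p d + cntS q d := by
  simp [cntS, List.count_append]

theorem cntS_singleton (x d : String) : cntS [x] d = if x = d then 1 else 0 := by
  by_cases h : x = d <;> simp [cntS, h]

theorem maxcS_nonneg (xs) : 0 ≤ maxcS xs := (PySem.List.le_foldl_max_int xs (cntS xs) 0).1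

theorem le_maxcS (xs : List String) (d : String) (h : d ∈ xs) : cntS xs d ≤ maxcS xs :=
  (PySem.List.le_foldl_max_int xs (cntS xs) 0).2 d h

theorem cntS_le_maxcS (xs : List String) (d : String) : cntS xs d ≤ maxcS xs := by
  by_cases h : d ∈ xs
  · exact le_maxcS xs d h
  · have : cntS xs d = 0 := by simp [cntS, List.count_eq_zero_of_not_mem h]
    rw [this]; exact maxcS_nonneg xs

theorem foldl_max_le (xs : List Int) : ∀ a m, a ≤ m → (∀ x ∈ xs, x ≤ m) → xs.foldl max a ≤ m := by
  induction xs with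
  | nil => intro a m h _; simpa using h
  | cons x t ih =>
      intro a m ha hx
      simp only [List.foldl_cons]
      exact ih _ m (max_le ha (hx x (by simp))) (fun y hy => hx y (by simp [hy]))

theorem maxcS_le (xs : List String) (m : Int) (h0 : 0 ≤ m)
    (h : ∀ d ∈ xs, cntS xs d ≤ m) : maxcS xs ≤ m := by
  have : maxcS xs = (xs.map (cntS xs)).foldl max 0 := by
    simp [maxcS, List.foldl_map]
  rw [this]
  exact foldl_max_le _ 0 m h0 (by intro x hx; obtain ⟨d, hd, rfl⟩ := List.mem_map.1 hx; exact h d hd)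

-- L1: appending one day updates the max to max(old max, new count of that day)
theorem maxcS_append_singleton (p : List String) (d : String) :
    maxcS (p ++ [d]) = max (maxcS p) (cntS (p ++ [d]) d) := by
  apply le_antisymm
  · apply maxcS_le
    · exact le_max_of_le_left (maxcS_nonneg p)
    · intro e he
      by_cases hed : e = d
      · subst hed; exact le_max_of_le_right le_rfl
      · have hep : e ∈ p := by
          rcases List.mem_append.1 he with h | h
          · exact h
          · simp at h; exact absurd h hed
        have : cntS (p ++ [d]) e = cntS p e := by
          rw [cntS_append, cntS_singleton]; simp [Ne.symm hed]
        rw [this]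
        exact le_max_of_le_left (le_maxcS p e hep)
  · apply max_le
    · apply maxcS_le
      · exact maxcS_nonneg _
      · intro e he
        calc cntS p e ≤ cntS (p ++ [d]) e := by rw [cntS_append]; have := cntS_nonneg [d] e; omega
          _ ≤ maxcS (p ++ [d]) := le_maxcS _ e (by simp [he])
    · exact le_maxcS _ d (by simp)

-- L2: frS over an appended list scans the first part first
theorem frS_append (M : Int) (q : List String) : ∀ (p r : List String),
    frS M p (q ++ r) = ((frS M p q).rec (frS M (p ++ q) r) (fun x => some x) : Option String) := by
  induction q with
  | nil => intro p r; simp [frS]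
  | cons d t ih =>
      intro p r
      simp only [List.cons_append, frS]
      by_cases h : cntS (p ++ [d]) d = M
      · simp [h]
      · simp only [if_neg h]
        rw [ih (p ++ [d]) r]
        simp [List.append_assoc]

-- L3: no day reaches M while the global max stays below M
theorem frS_none (M : Int) : ∀ (r p : List String), maxcS (p ++ r) < M → frS M p r = none := by
  intro r
  induction r with
  | nil => intro p _; simp [frS]
  | cons d t ih =>
      intro p h
      have hc : cntS (p ++ [d]) d < M := by
        have e1 : cntS (p ++ d :: t) d = cntS (p ++ [d]) d + cntS t d := by
          rw [show p ++ d :: t = (p ++ [d]) ++ t by simp, cntS_append]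
        have e2 := cntS_le_maxcS (p ++ d :: t) d
        have e3 := cntS_nonneg t d
        omega
      simp only [frS, if_neg (by omega : ¬ cntS (p ++ [d]) d = M)]
      apply ih
      have : (p ++ [d]) ++ t = p ++ d :: t := by simp
      rw [this]; exact h

-- at the step appending day d, both invariant conjuncts are preserved for the new leader
theorem frS_reach (p : List String) (d : String) (M : Int)
    (hlt : maxcS p < M) (hc : cntS (p ++ [d]) d = M) :
    frS M [] (p ++ [d]) = some d := by
  rw [frS_append]
  rw [frS_none M p [] (by simpa using hlt)]
  simp [frS, hc]

-- A's fold, abstracted: invariant-carrying induction over the remaining orders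
theorem foldA (r : List (String × String × String)) :
    ∀ (c : PySem.Dict String Int) (mb : String) (p : List String),
    (∀ d, c.getD d 0 = cntS p d) →
    (∀ d, c.contains d = decide (d ∈ p)) →
    cntS p mb = maxcS p →
    frS (maxcS p) [] p = some mb →
    frS (maxcS (p ++ r.map (·.2.2))) [] (p ++ r.map (·.2.2)) =
      some ((r.foldl (fun st o =>
        let count :=
          if st.1.contains o.2.2 = false then st.1.insert o.2.2 (1 : Int)
          else st.1.modify o.2.2 0 (· + 1)
        let mb := if count.getD o.2.2 0 > count.getD st.2 0 then o.2.2 else st.2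
        (count, mb)) (c, mb)).2) := by
  induction r with
  | nil => intro c mb p _ _ _ h2; simpa using h2
  | cons o r ih =>
      intro c mb p hgetD hcont h1 h2
      simp only [List.foldl_cons, List.map_cons]
      rw [show p ++ o.2.2 :: r.map (·.2.2) = (p ++ [o.2.2]) ++ r.map (·.2.2) by simp]
      -- abbreviations
      have hM0 := maxcS_nonneg p
      have hnM := cntS_le_maxcS p o.2.2
      have cdd : cntS (p ++ [o.2.2]) o.2.2 = cntS p o.2.2 + 1 := by
        rw [cntS_append, cntS_singleton]; simp
      have hM' : maxcS (p ++ [o.2.2]) = max (maxcS p) (cntS p o.2.2 + 1) := by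
        rw [maxcS_append_singleton, cdd]
      -- the updated dict abstracts to counts over p ++ [day]
      have hgetD' : ∀ e, (if c.contains o.2.2 = false then c.insert o.2.2 (1 : Int)
          else c.modify o.2.2 0 (· + 1)).getD e 0 = cntS (p ++ [o.2.2]) e := by
        intro e
        have hcnt : ∀ e, cntS (p ++ [o.2.2]) e = cntS p e + (if o.2.2 = e then 1 else 0) := by
          intro e; rw [cntS_append, cntS_singleton]
        by_cases hdp : o.2.2 ∈ p
        · have hifc : (if c.contains o.2.2 = false then c.insert o.2.2 (1 : Int)
              else c.modify o.2.2 0 (· + 1)) = c.modify o.2.2 0 (· + 1) := by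
            rw [hcont o.2.2]; simp [hdp]
          rw [hifc, PySem.Dict.getD_modify, hcnt e]
          by_cases he : e = o.2.2
          · simp [he, hgetD o.2.2]
          · simp [he, hgetD e, Ne.symm he]
        · have hz : cntS p o.2.2 = 0 := by simp [cntS, List.count_eq_zero_of_not_mem hdp]
          have hifc : (if c.contains o.2.2 = false then c.insert o.2.2 (1 : Int)
              else c.modify o.2.2 0 (· + 1)) = c.insert o.2.2 (1 : Int) := by
            rw [hcont o.2.2]; simp [hdp]
          rw [hifc, PySem.Dict.getD_insert, hcnt e]
          by_cases he : e = o.2.2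
          · simp [he, hz]
          · simp [he, hgetD e, Ne.symm he]
      have hcont' : ∀ e, (if c.contains o.2.2 = false then c.insert o.2.2 (1 : Int)
          else c.modify o.2.2 0 (· + 1)).contains e = decide (e ∈ p ++ [o.2.2]) := by
        intro e
        by_cases hdp : o.2.2 ∈ p
        · have hifc : (if c.contains o.2.2 = false then c.insert o.2.2 (1 : Int)
              else c.modify o.2.2 0 (· + 1)) = c.modify o.2.2 0 (· + 1) := by
            rw [hcont o.2.2]; simp [hdp]
          rw [hifc, PySem.Dict.contains_modify, hcont e]
          by_cases he : e = o.2.2 <;> simp [he, hdp]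
        · have hifc : (if c.contains o.2.2 = false then c.insert o.2.2 (1 : Int)
              else c.modify o.2.2 0 (· + 1)) = c.insert o.2.2 (1 : Int) := by
            rw [hcont o.2.2]; simp [hdp]
          rw [hifc, PySem.Dict.contains_insert, hcont e]
          by_cases he : e = o.2.2 <;> simp [he]
      -- beta/let-reduce the step and rewrite the comparison through hgetD'
      show frS (maxcS ((p ++ [o.2.2]) ++ r.map (·.2.2))) [] ((p ++ [o.2.2]) ++ r.map (·.2.2)) = _
      simp only [hgetD']
      by_cases hcondo : cntS (p ++ [o.2.2]) o.2.2 > cntS (p ++ [o.2.2]) mb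
      · -- new leader o.2.2
        have hmbd : mb ≠ o.2.2 := by
          intro h; rw [h] at hcondo; omega
        have cmb : cntS (p ++ [o.2.2]) mb = cntS p mb := by
          rw [cntS_append, cntS_singleton]; simp [Ne.symm hmbd]
        have hn : cntS p o.2.2 = maxcS p := by rw [cmb, h1] at hcondo; omega
        have hMp' : maxcS (p ++ [o.2.2]) = maxcS p + 1 := by rw [hM', hn]; omega
        rw [if_pos hcondo]
        apply ih
        · exact hgetD'
        · exact hcont'
        · rw [cdd, hn, hMp']
        · rw [hMp']
          exact frS_reach p o.2.2 _ (by omega) (by rw [cdd, hn])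
      · rw [if_neg hcondo]
        by_cases hmbd : mb = o.2.2
        · -- the leader itself advances: still the first to reach the new max
          have hn : cntS p o.2.2 = maxcS p := by rw [← hmbd]; exact h1
          have hMp' : maxcS (p ++ [o.2.2]) = maxcS p + 1 := by rw [hM', hn]; omega
          apply ih
          · exact hgetD'
          · exact hcont'
          · rw [hmbd, cdd, hn, hMp']
          · rw [hMp', hmbd]
            exact frS_reach p o.2.2 _ (by omega) (by rw [cdd, hn])
        · -- nothing changes
          have cmb : cntS (p ++ [o.2.2]) mb = cntS p mb := by
            rw [cntS_append, cntS_singleton]; simp [Ne.symm hmbd]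
          have hle : cntS p o.2.2 + 1 ≤ maxcS p := by
            rw [cdd, cmb, h1] at hcondo; omega
          have hMp' : maxcS (p ++ [o.2.2]) = maxcS p := by rw [hM']; omega
          apply ih
          · exact hgetD'
          · exact hcont'
          · rw [cmb, h1, hMp']
          · rw [hMp', frS_append]
            rw [show ([] : List String) ++ p = p by simp, h2]

-- characterisation of A's result
theorem busiest_day_eq (o0 : String × String × String) (rest : List (String × String × String)) :
    frS (maxcS ((o0 :: rest).map (·.2.2))) [] ((o0 :: rest).map (·.2.2)) =
      some (busiest_day (o0 :: rest)) := by
  unfold busiest_day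
  simp only [List.foldl_cons, List.map_cons]
  have hd0 : ∀ e, (PySem.Dict.empty.insert o0.2.2 (1 : Int)).getD e 0 = cntS [o0.2.2] e := by
    intro e
    rw [PySem.Dict.getD_insert, cntS_singleton]
    by_cases he : e = o0.2.2
    · simp [he]
    · simp [he, Ne.symm he]
  have hstep : (if (PySem.Dict.empty : PySem.Dict String Int).contains o0.2.2 = false
        then (PySem.Dict.empty : PySem.Dict String Int).insert o0.2.2 (1 : Int)
        else PySem.Dict.empty.modify o0.2.2 0 (· + 1)) = PySem.Dict.empty.insert o0.2.2 (1 : Int) := by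
    simp [PySem.Dict.contains_empty]
  simp only [hstep, ite_self]
  have h1 : cntS [o0.2.2] o0.2.2 = 1 := by simp [cntS]
  have hmax1 : maxcS [o0.2.2] = 1 := by simp [maxcS, cntS]
  have := foldA rest (PySem.Dict.empty.insert o0.2.2 (1 : Int)) o0.2.2 [o0.2.2]
    hd0
    (by intro e
        rw [PySem.Dict.contains_insert, PySem.Dict.contains_empty]
        by_cases he : e = o0.2.2 <;> simp [he])
    (by rw [h1, hmax1])
    (by rw [hmax1]; simp [frS, h1])
  simpa using this

-- B's first pass computes the peak = maxcS
theorem peak_eq (o0 : String × String × String) (rest : List (String × String × String)) :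
    (PySem.List.max? ((o0 :: rest).foldl (fun d o => d.insert o.2.2 (d.getD o.2.2 0 + 1))
        (PySem.Dict.empty : PySem.Dict String Int)).values (fun x => x)).getD 0 =
      maxcS ((o0 :: rest).map (·.2.2)) := by
  set xs : List String := (o0 :: rest).map (·.2.2) with hxs
  have hfold : (o0 :: rest).foldl (fun d o => d.insert o.2.2 (d.getD o.2.2 0 + 1))
      (PySem.Dict.empty : PySem.Dict String Int) = PySem.Dict.counter xs := by
    rw [hxs, ← PySem.Dict.foldl_insert_getD_add_one_eq_counter, List.foldl_map]
  rw [hfold]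
  have hvals : (PySem.Dict.counter xs).values =
      (PySem.Set.ofList xs).map (fun k => ((xs.count k : Int))) := by
    show ((PySem.Dict.counter xs).items).map (·.2) = _
    rw [PySem.Dict.items_counter, List.map_map]
    rfl
  rw [hvals]
  have hne : (PySem.Set.ofList xs).map (fun k => ((xs.count k : Int))) ≠ [] := by
    have hmem : o0.2.2 ∈ PySem.Set.ofList xs := (PySem.Set.mem_ofList xs _).2 (by simp [hxs])
    intro h
    exact List.ne_nil_of_mem hmem (List.map_eq_nil_iff.1 h)
  obtain ⟨m, hm⟩ : ∃ m, PySem.List.max? ((PySem.Set.ofList xs).map (fun k => ((xs.count k : Int)))) (fun x => x) = some m := by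
    cases hq : PySem.List.max? ((PySem.Set.ofList xs).map (fun k => ((xs.count k : Int)))) (fun x => x) with
    | none => exact absurd (( PySem.List.max?_eq_none_iff _ _).1 hq) hne
    | some m => exact ⟨m, rfl⟩
  rw [hm]
  obtain ⟨k, hk, rfl⟩ := List.mem_map.1 (PySem.List.max?_mem hm)
  have hkxs : k ∈ xs := (PySem.Set.mem_ofList xs _).1 hk
  apply le_antisymm
  · exact le_maxcS xs k hkxs
  · apply maxcS_le _ _ (by exact Int.natCast_nonneg _)
    intro d hd
    have hdset : d ∈ PySem.Set.ofList xs := (PySem.Set.mem_ofList xs _).2 hd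
    have := PySem.List.max?_isMax hm ((xs.count d : Int)) (List.mem_map.2 ⟨d, hdset, rfl⟩)
    simpa [cntS] using this

-- B's second pass is frS
theorem scan_eq (M : Int) (r : List (String × String × String)) :
    ∀ (run : PySem.Dict String Int) (p : List String),
    (∀ d, run.getD d 0 = cntS p d) →
    busiestAltScan M r run = (frS M p (r.map (·.2.2))).getD "" := by
  induction r with
  | nil => intro run p _; simp [busiestAltScan, frS]
  | cons o r ih =>
      intro run p hc
      have hnew : ∀ e, (run.insert o.2.2 (run.getD o.2.2 0 + 1)).getD e 0 = cntS (p ++ [o.2.2]) e := by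
        intro e
        rw [PySem.Dict.getD_insert, cntS_append, cntS_singleton]
        by_cases he : e = o.2.2
        · simp [he, hc o.2.2]
        · simp [he, hc e, Ne.symm he]
      simp only [busiestAltScan, List.map_cons, frS, hnew o.2.2]
      by_cases h : cntS (p ++ [o.2.2]) o.2.2 = M
      · simp [h]
      · simp only [if_neg h]
        exact ih _ _ hnew

-- ===== VERDICT (by name: the statement is the Claim_ definition above) =====
theorem busiest_day_spec : Claim_equal_busiest_day := by
  unfold Claim_equal_busiest_day
  intro l _ hpre
  unfold Spec_busiest_day
  cases l with
  | nil => exact absurd rfl hpre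
  | cons o0 rest =>
      show busiest_day (o0 :: rest) =
        busiestAltScan ((PySem.List.max? ((o0 :: rest).foldl
            (fun d o => d.insert o.2.2 (d.getD o.2.2 0 + 1))
            (PySem.Dict.empty : PySem.Dict String Int)).values (fun x => x)).getD 0)
          (o0 :: rest) PySem.Dict.empty
      rw [peak_eq o0 rest]
      rw [scan_eq _ _ PySem.Dict.empty [] (by intro d; simp [cntS, PySem.Dict.getD_empty])]
      rw [busiest_day_eq o0 rest]
      simp
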